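-- pv_equiv track=rewrite | github.com/excray/coding-algos | excrayg/leetcode/python/fun_algos.py | naive_max_perm
-- ===== SOURCE A (Python) =====
-- def naive_max_perm(preferred_seats, seats_in_contention):
-- 	if len(seats_in_contention) <= 1:
-- 		return seats_in_contention
-- 	seats_that_are_preferred = set(preferred_seats[i] for i in seats_in_contention)
-- 	seats_not_preferred = seats_in_contention - seats_that_are_preferred
-- 	if seats_not_preferred:
-- 		seats_in_contention -= seats_not_preferred
-- 		return naive_max_perm(preferred_seats, seats_in_contention)
--
-- 	return seats_in_contention
-- ===== SOURCE B (Python) =====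
-- def naive_max_perm(preferred_seats, seats_in_contention):
--     if len(seats_in_contention) <= 1:
--         return seats_in_contention
--     # count once how many seats in contention point at each seat, then peel
--     # zero-referenced seats round by round, updating the counts incrementally
--     alive = list(seats_in_contention)
--     indeg = {}
--     for i in alive:
--         x = preferred_seats[i]
--         indeg[x] = indeg.get(x, 0) + 1
--     while True:
--         zeros = [i for i in alive if indeg.get(i, 0) == 0]
--         if not zeros:
--             return set(alive)
--         alive = [i for i in alive if indeg.get(i, 0) != 0]
--         for i in zeros:
--             indeg[preferred_seats[i]] -= 1
--         if len(alive) <= 1: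
--             return set(alive)
-- ===== Notes on version B (the rewrite author's own statement) =====
-- stated objective: alternative
-- what changed: B builds a reference-count dict over the seats once and peels zero-referenced seats round by round, decrementing counts incrementally, instead of A's recursion that rebuilds the preferred-seat set and subtracts it from the contention set on every level.
import Mathlib
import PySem

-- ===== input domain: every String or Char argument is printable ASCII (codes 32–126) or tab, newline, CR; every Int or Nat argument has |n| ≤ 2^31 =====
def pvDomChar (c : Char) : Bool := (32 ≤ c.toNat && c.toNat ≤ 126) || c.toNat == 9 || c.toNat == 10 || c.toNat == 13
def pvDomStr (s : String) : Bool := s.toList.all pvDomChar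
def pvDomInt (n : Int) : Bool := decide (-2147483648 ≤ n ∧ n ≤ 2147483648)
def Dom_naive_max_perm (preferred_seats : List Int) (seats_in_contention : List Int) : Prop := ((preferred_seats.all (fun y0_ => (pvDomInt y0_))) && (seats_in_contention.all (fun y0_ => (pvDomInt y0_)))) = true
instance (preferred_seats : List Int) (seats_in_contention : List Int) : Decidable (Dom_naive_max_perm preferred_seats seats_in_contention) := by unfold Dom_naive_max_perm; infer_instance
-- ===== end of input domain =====

-- B keeps a reference-count dict built once and peels zero-referenced seats round by round,
-- instead of A's rebuilding the preferred-seat set and subtracting it on every recursion;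
-- the equivalence is about the RETURN value only (A also shrinks the caller's
-- seats_in_contention set in place via '-='; B leaves its arguments untouched).

-- ===== PORT A =====
-- termination fact for A's recursion, cited by name in decreasing_by below
theorem pvDiff_diff_length_lt (s t : List Int)
    (h : ¬ (PySem.Set.diff s t).isEmpty = true) :
    (PySem.Set.diff s (PySem.Set.diff s t)).length < s.length := by
  have hne : PySem.Set.diff s t ≠ [] := fun h0 => h (by simp [h0])
  rcases List.exists_mem_of_ne_nil _ hne with ⟨x, hx⟩
  have hxs : x ∈ s := (List.mem_filter.mp hx).1
  simp only [PySem.Set.diff]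
  rw [List.length_filter_lt_length_iff_exists]
  have hnt : x ∉ t := by
    have h2 := (List.mem_filter.mp hx).2
    simpa [PySem.Set.contains] using h2
  exact ⟨x, hxs, by simp [PySem.Set.contains, hxs, hnt]⟩

-- seats_in_contention is a Python set: it is a List Int holding the distinct elements.
-- preferred_seats[i] is PySem.List.pyGetD with default 0: exact under Pre_ (every seat a
-- valid Python index); out of range Python raises IndexError, excluded by Pre_.
def naive_max_perm (preferred_seats : List Int) (seats_in_contention : List Int) : List Int :=
  if seats_in_contention.length ≤ 1 then seats_in_contention
  else
    let pref := PySem.Set.ofList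
      (seats_in_contention.map (fun i => PySem.List.pyGetD preferred_seats i 0))
    let notpref := PySem.Set.diff seats_in_contention pref
    if h : notpref.isEmpty then seats_in_contention
    else naive_max_perm preferred_seats (PySem.Set.diff seats_in_contention notpref)
termination_by seats_in_contention.length
decreasing_by exact pvDiff_diff_length_lt _ _ h

-- ===== PORT B =====
-- the while loop of Source B: collect the zero-referenced seats, drop them from alive, decrement
-- the count of each dropped seat's preferred seat ('indeg[preferred_seats[i]] -= 1': the key
-- is always present, so Dict.modify with default 0 is exact), stop when nothing was dropped
-- or at most one seat remains.  Each round drops a seat, so fuel = |seats| never runs out.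
def pvPeelRounds (preferred_seats : List Int) (fuel : Nat) (alive : List Int)
    (indeg : PySem.Dict Int Int) : List Int :=
  match fuel with
  | 0 => alive
  | fuel + 1 =>
    let zeros := alive.filter (fun i => indeg.getD i 0 == 0)
    if zeros.isEmpty then alive
    else
      let alive' := alive.filter (fun i => !(indeg.getD i 0 == 0))
      let indeg' := zeros.foldl
        (fun d i => d.modify (PySem.List.pyGetD preferred_seats i 0) 0 (· - 1)) indeg
      if alive'.length ≤ 1 then alive'
      else pvPeelRounds preferred_seats fuel alive' indeg'

def naive_max_perm_alt (preferred_seats : List Int) (seats_in_contention : List Int) : List Int :=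
  if seats_in_contention.length ≤ 1 then seats_in_contention
  else
    -- indeg[x] = indeg.get(x, 0) + 1 over the seats in contention
    let indeg := seats_in_contention.foldl
      (fun d i => d.modify (PySem.List.pyGetD preferred_seats i 0) 0 (· + 1)) PySem.Dict.empty
    pvPeelRounds preferred_seats seats_in_contention.length seats_in_contention indeg

-- ===== PRECONDITION & SPEC =====
-- Pre_ excludes exactly the inputs on which Python A raises IndexError: two or more seats in
-- contention (with ≤ 1 seat A returns before indexing) of which some seat is not a valid
-- (possibly negative) Python index into preferred_seats.
def Pre_naive_max_perm (preferred_seats : List Int) (seats_in_contention : List Int) : Prop :=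
  seats_in_contention.length ≤ 1 ∨
    ∀ i ∈ seats_in_contention, PySem.Raise.InRange preferred_seats.length i
instance (preferred_seats : List Int) (seats_in_contention : List Int) : Decidable (Pre_naive_max_perm preferred_seats seats_in_contention) := by unfold Pre_naive_max_perm; infer_instance

def pvWitness_naive_max_perm : List Int × List Int := ([1, 0], [0, 1])

def Spec_naive_max_perm (preferred_seats : List Int) (seats_in_contention : List Int) (out : List Int) : Prop := out = naive_max_perm_alt preferred_seats seats_in_contention
instance (preferred_seats : List Int) (seats_in_contention : List Int) (out : List Int) : Decidable (Spec_naive_max_perm preferred_seats seats_in_contention out) := by unfold Spec_naive_max_perm; infer_instance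

-- ===== CLAIM (what is proved, stated in full; the proofs are below) =====
def Claim_equal_naive_max_perm : Prop := ∀ (preferred_seats : List Int) (seats_in_contention : List Int), Dom_naive_max_perm preferred_seats seats_in_contention → Pre_naive_max_perm preferred_seats seats_in_contention → Spec_naive_max_perm preferred_seats seats_in_contention (naive_max_perm preferred_seats seats_in_contention)

-- ===== LEMMAS AND PROOFS =====

theorem pvContains_ofList (M : List Int) (x : Int) :
    (PySem.Set.ofList M).contains x = M.contains x := by
  by_cases h : x ∈ M <;> simp [PySem.Set.contains, PySem.Set.mem_ofList, h]

-- the decrement loop, key-wise: each seat of zs takes one off the count of its preferred seat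
theorem pvDec_getD (p : List Int) (zs : List Int) :
    ∀ (d : PySem.Dict Int Int) (x : Int),
      (zs.foldl (fun d i => d.modify (PySem.List.pyGetD p i 0) 0 (· - 1)) d).getD x 0
        = d.getD x 0 - ((zs.map (fun i => PySem.List.pyGetD p i 0)).count x : Int) := by
  induction zs with
  | nil => simp
  | cons a t ih =>
    intro d x
    simp only [List.foldl_cons, ih, List.map_cons, List.count_cons]
    rw [PySem.Dict.getD_modify]
    by_cases hx : x = PySem.List.pyGetD p a 0
    · simp only [hx, beq_self_eq_true, if_true]
      push_cast
      ring
    · simp only [if_neg hx]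
      have : (PySem.List.pyGetD p a 0 == x) = false := by
        simp [BEq.comm]
        omega
      simp [this]

-- the build loop, key-wise: each seat adds one to the count of its preferred seat
theorem pvInc_getD (p : List Int) (zs : List Int) :
    ∀ (d : PySem.Dict Int Int) (x : Int),
      (zs.foldl (fun d i => d.modify (PySem.List.pyGetD p i 0) 0 (· + 1)) d).getD x 0
        = d.getD x 0 + ((zs.map (fun i => PySem.List.pyGetD p i 0)).count x : Int) := by
  induction zs with
  | nil => simp
  | cons a t ih =>
    intro d x
    simp only [List.foldl_cons, ih, List.map_cons, List.count_cons]
    rw [PySem.Dict.getD_modify]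
    by_cases hx : x = PySem.List.pyGetD p a 0
    · simp only [hx, beq_self_eq_true, if_true]
      push_cast
      ring
    · simp only [if_neg hx]
      have : (PySem.List.pyGetD p a 0 == x) = false := by
        simp [BEq.comm]
        omega
      simp [this]

-- A's recursion, one step, with the branch condition written out
theorem pvA_step (p s : List Int) (hlen : ¬ s.length ≤ 1) :
    naive_max_perm p s
      = if (PySem.Set.diff s
            (PySem.Set.ofList (s.map (fun i => PySem.List.pyGetD p i 0)))).isEmpty then s
        else naive_max_perm p
          (PySem.Set.diff s
            (PySem.Set.diff s
              (PySem.Set.ofList (s.map (fun i => PySem.List.pyGetD p i 0))))) := by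
  conv_lhs => rw [naive_max_perm]
  rw [if_neg hlen]
  by_cases h : (PySem.Set.diff s
      (PySem.Set.ofList (s.map (fun i => PySem.List.pyGetD p i 0)))).isEmpty <;>
    simp [h]

-- one synchronous round of B equals one recursion step of A, by the count invariant
theorem pvPeelRounds_eq (p : List Int) :
    ∀ (n : Nat) (alive : List Int) (indeg : PySem.Dict Int Int),
      (∀ x : Int, indeg.getD x 0
          = ((alive.map (fun i => PySem.List.pyGetD p i 0)).count x : Int)) →
      alive.length ≤ n → 1 < alive.length →
      pvPeelRounds p n alive indeg = naive_max_perm p alive := by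
  intro n
  induction n with
  | zero => intro alive _ _ h1 h2; omega
  | succ n ih =>
    intro alive indeg hinv hle hlen
    have hpred : ∀ i : Int, (indeg.getD i 0 == 0)
        = !(alive.map (fun i => PySem.List.pyGetD p i 0)).contains i := by
      intro i
      by_cases hm : i ∈ alive.map (fun i => PySem.List.pyGetD p i 0)
      · have h0 : (alive.map (fun i => PySem.List.pyGetD p i 0)).count i ≠ 0 := by
          simpa [List.count_eq_zero] using hm
        simp [hinv i, hm]
        omega
      · have h0 : (alive.map (fun i => PySem.List.pyGetD p i 0)).count i = 0 :=
          List.count_eq_zero.mpr hm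
        simp [hinv i, h0, hm]
    -- A's round set and survivors, written with B's predicate
    have hzeros : PySem.Set.diff alive
          (PySem.Set.ofList (alive.map (fun i => PySem.List.pyGetD p i 0)))
        = alive.filter (fun i => indeg.getD i 0 == 0) := by
      simp only [PySem.Set.diff]
      refine List.filter_congr (fun i _ => ?_)
      rw [pvContains_ofList, ← hpred i]
    have halive' : PySem.Set.diff alive (alive.filter (fun i => indeg.getD i 0 == 0))
        = alive.filter (fun i => !(indeg.getD i 0 == 0)) := by
      simp only [PySem.Set.diff]
      refine List.filter_congr (fun i hi => ?_)
      by_cases hq : (indeg.getD i 0 == 0) = true <;>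
        simp [PySem.Set.contains, List.mem_filter, hi, hq]
    rw [pvA_step p alive (by omega), hzeros, halive']
    simp only [pvPeelRounds]
    by_cases hz : (alive.filter (fun i => indeg.getD i 0 == 0)).isEmpty
    · simp [hz]
    · simp only [hz, if_false, Bool.false_eq_true]
      -- count split over the round: removed seats plus survivors
      have hsplit : ∀ x : Int,
          ((alive.map (fun i => PySem.List.pyGetD p i 0)).count x : Int)
            = (((alive.filter (fun i => indeg.getD i 0 == 0)).map
                  (fun i => PySem.List.pyGetD p i 0)).count x : Int)
              + (((alive.filter (fun i => !(indeg.getD i 0 == 0))).map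
                  (fun i => PySem.List.pyGetD p i 0)).count x : Int) := by
        intro x
        have hperm := List.filter_append_perm (fun i => indeg.getD i 0 == 0) alive
        have := (hperm.map (fun i => PySem.List.pyGetD p i 0)).count_eq x
        simp only [List.map_append, List.count_append] at this
        push_cast [← this]
        ring
      have hinv' : ∀ x : Int,
          ((alive.filter (fun i => indeg.getD i 0 == 0)).foldl
              (fun d i => d.modify (PySem.List.pyGetD p i 0) 0 (· - 1)) indeg).getD x 0
            = (((alive.filter (fun i => !(indeg.getD i 0 == 0))).map
                (fun i => PySem.List.pyGetD p i 0)).count x : Int) := by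
        intro x
        rw [pvDec_getD, hinv x, hsplit x]
        ring
      have hlt : (alive.filter (fun i => !(indeg.getD i 0 == 0))).length < alive.length := by
        have hne : alive.filter (fun i => indeg.getD i 0 == 0) ≠ [] :=
          fun h0 => hz (by simp [h0])
        rcases List.exists_mem_of_ne_nil _ hne with ⟨x, hx⟩
        obtain ⟨hxa, hxq⟩ := List.mem_filter.mp hx
        rw [List.length_filter_lt_length_iff_exists]
        exact ⟨x, hxa, by simp [hxq]⟩
      by_cases hsmall : (alive.filter (fun i => !(indeg.getD i 0 == 0))).length ≤ 1
      · rw [if_pos hsmall, naive_max_perm, if_pos hsmall]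
      · rw [if_neg hsmall]
        exact ih _ _ hinv' (by omega) (by omega)

-- ===== VERDICT (by name: the statement is the Claim_ definition above) =====
theorem naive_max_perm_spec : Claim_equal_naive_max_perm := by
  intro p s _ _
  unfold Spec_naive_max_perm
  by_cases hlen : s.length ≤ 1
  · conv_lhs => rw [naive_max_perm]
    rw [if_pos hlen, naive_max_perm_alt, if_pos hlen]
  · rw [naive_max_perm_alt, if_neg hlen]
    refine (pvPeelRounds_eq p s.length s _ ?_ le_rfl (by omega)).symm
    intro x
    rw [pvInc_getD]
    simp
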